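-- pv_equiv track=rewrite | github.com/Panda-Z-Coding/PythonAlgorithm | 2025Py国赛/儿童数.py | f
-- ===== SOURCE A (Python) =====
-- def f(n):
--     factor = [] # 存质因数
--     for nn in range(n, 0, -1):
--
--         for i in range(2, nn + 1):
--             while nn % i == 0:
--                 nn //= i
--                 factor.append(i)
--             if nn == 1:
--                 break
--     return factor
-- ===== SOURCE B (Python) =====
-- def f(n):
--     out = []
--     for nn in range(n, 0, -1):
--         d = 2
--         while d * d <= nn:
--             if nn % d == 0:
--                 nn //= d
--                 out.append(d)
--             else:
--                 d += 1
--         if nn > 1: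
--             out.append(nn)
--     return out
-- ===== Notes on version B (the rewrite author's own statement) =====
-- stated objective: faster
-- what changed: A trial-divides each nn by every i up to nn itself; B trial-divides only up to sqrt(nn) in a single while loop and appends the remaining prime cofactor, so each number is factored in O(sqrt(nn)) instead of O(largest prime factor).
import Mathlib
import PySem

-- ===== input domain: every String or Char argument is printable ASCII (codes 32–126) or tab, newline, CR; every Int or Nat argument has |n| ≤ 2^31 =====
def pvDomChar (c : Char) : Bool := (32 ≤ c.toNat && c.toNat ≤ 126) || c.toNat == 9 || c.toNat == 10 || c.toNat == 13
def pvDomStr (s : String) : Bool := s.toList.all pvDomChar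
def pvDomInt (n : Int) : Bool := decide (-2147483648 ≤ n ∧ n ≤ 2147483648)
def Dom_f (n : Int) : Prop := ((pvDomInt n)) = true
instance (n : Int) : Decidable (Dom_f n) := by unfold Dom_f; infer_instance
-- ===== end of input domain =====

-- B replaces A's per-number trial division by every i up to nn with trial division only up to
-- sqrt(nn) plus the leftover prime cofactor (faster); return values proved equal for every n.

-- termination helper for both ports' division loops
theorem floordiv_toNat_lt (nn i : Int) (h1 : 1 ≤ nn) (h2 : 2 ≤ i) : (nn / i).toNat < nn.toNat := by
  have ha : nn = (nn.toNat : Int) := (Int.toNat_of_nonneg (by omega)).symm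
  have hb : i = (i.toNat : Int) := (Int.toNat_of_nonneg (by omega)).symm
  have he : (nn / i).toNat = nn.toNat / i.toNat := by
    rw [ha, hb]; exact Nat.add_zero _
  rw [he]
  exact Nat.div_lt_self (by omega) (by omega)

-- ===== PORT A =====
-- A's inner `while nn % i == 0: nn //= i; factor.append(i)` (the 2 ≤ i ∧ 1 ≤ nn guard only makes
-- the recursion total; A's loop runs it exactly under those conditions)
def divideOut (nn i : Int) : Int × List Int :=
  if h : 2 ≤ i ∧ 1 ≤ nn ∧ PySem.Int.mod nn i = 0 then
    ((divideOut (PySem.Int.floordiv nn i) i).1, i :: (divideOut (PySem.Int.floordiv nn i) i).2)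
  else (nn, [])
termination_by nn.toNat
decreasing_by
  all_goals
    obtain ⟨hi, hnn, hm⟩ := h
    rw [PySem.Int.floordiv_eq_ediv_of_pos (by omega)]
    exact floordiv_toNat_lt nn i hnn hi

-- A's `for i in range(2, nn+1): … if nn == 1: break`
def innerA : List Int → Int → List Int → List Int
  | [], _, acc => acc
  | i :: rest, nn, acc =>
      if (divideOut nn i).1 = 1 then acc ++ (divideOut nn i).2
      else innerA rest (divideOut nn i).1 (acc ++ (divideOut nn i).2)

def f (n : Int) : List Int :=
  (PySem.List.pyRange n 0 (-1)).foldl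
    (fun acc nn => innerA (PySem.List.pyRange 2 (nn + 1) 1) nn acc) []

-- ===== PORT B =====
-- B's `while d * d <= nn: …` then `if nn > 1: out.append(nn)` (the 2 ≤ d guard only makes the
-- recursion total; B's loop always has d ≥ 2)
def facLoop (nn d : Int) (acc : List Int) : List Int :=
  if h : 2 ≤ d ∧ d * d ≤ nn then
    if PySem.Int.mod nn d = 0 then
      facLoop (PySem.Int.floordiv nn d) d (acc ++ [d])
    else facLoop nn (d + 1) acc
  else if 1 < nn then acc ++ [nn] else acc
termination_by (nn.toNat, (nn - d).toNat)
decreasing_by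
  all_goals obtain ⟨hd, hsq⟩ := h
  all_goals first
    | (apply Prod.Lex.left
       have h4 : (4 : Int) ≤ d * d := by nlinarith
       rw [PySem.Int.floordiv_eq_ediv_of_pos (by omega)]
       exact floordiv_toNat_lt nn d (by omega) hd)
    | (apply Prod.Lex.right
       have hdn : 2 * d ≤ nn := by nlinarith
       omega)

def f_alt (n : Int) : List Int :=
  (PySem.List.pyRange n 0 (-1)).foldl (fun acc nn => facLoop nn 2 acc) []

-- ===== PRECONDITION & SPEC =====
def Spec_f (n : Int) (out : List Int) : Prop := out = f_alt n
instance (n : Int) (out : List Int) : Decidable (Spec_f n out) := by unfold Spec_f; infer_instance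

-- ===== CLAIM (what is proved, stated in full; the proofs are below) =====
def Claim_equal_f : Prop := ∀ (n : Int), Dom_f n → Spec_f n (f n)

-- ===== LEMMAS AND PROOFS =====

-- reference: the sorted prime factorisation of M, by least prime factor
def F (M : ℕ) : List Int :=
  if h : 2 ≤ M then ((M.minFac : ℕ) : Int) :: F (M / M.minFac) else []
termination_by M
decreasing_by
  exact Nat.div_lt_self (by omega) (Nat.minFac_prime (by omega)).one_lt

-- "M has no divisor in [2, i)"
def NoDiv (M i : ℕ) : Prop := ∀ e, 2 ≤ e → e < i → ¬ e ∣ M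

theorem F_one : F 1 = [] := by rw [F]; simp

theorem F_eq (M : ℕ) (h2 : 2 ≤ M) : F M = ((M.minFac : ℕ) : Int) :: F (M / M.minFac) := by
  rw [F]; simp [h2]

theorem NoDiv_two (M : ℕ) : NoDiv M 2 := by
  intro e he hlt; omega

theorem NoDiv_of_dvd {M K i : ℕ} (h : NoDiv M i) (hk : K ∣ M) : NoDiv K i :=
  fun e h2 hlt hd => h e h2 hlt (hd.trans hk)

theorem minFac_eq_of (M i : ℕ) (h2 : 2 ≤ M) (hi2 : 2 ≤ i) (hdvd : i ∣ M)
    (hmin : NoDiv M i) : M.minFac = i := by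
  have hle := Nat.minFac_le_of_dvd hi2 hdvd
  have hd := Nat.minFac_dvd M
  have h2f := (Nat.minFac_prime (by omega : M ≠ 1)).two_le
  rcases lt_or_eq_of_le hle with h | h
  · exact absurd hd (hmin _ h2f h)
  · exact h

theorem prime_of_small (M d : ℕ) (h2 : 2 ≤ M) (hlt : M < d * d)
    (hmin : NoDiv M d) : M.minFac = M := by
  have hpd : M.minFac ∣ M := Nat.minFac_dvd M
  have hp2 : 2 ≤ M.minFac := (Nat.minFac_prime (by omega : M ≠ 1)).two_le
  have hpM : M.minFac ≤ M := Nat.le_of_dvd (by omega) hpd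
  by_contra hne
  have hq : M / M.minFac ∣ M := Nat.div_dvd_of_dvd hpd
  have hmul : M / M.minFac * M.minFac = M := Nat.div_mul_cancel hpd
  have hq2 : 2 ≤ M / M.minFac := by
    rcases Nat.lt_or_ge (M / M.minFac) 2 with h | h
    · interval_cases h' : (M / M.minFac) <;> omega
    · exact h
  have hple : M.minFac ≤ M / M.minFac := Nat.minFac_le_of_dvd hq2 hq
  have hsq : M.minFac * M.minFac ≤ M := by nlinarith
  have hpd' : M.minFac < d := by nlinarith
  exact hmin _ hp2 hpd' hpd

-- A's while loop divides out exactly the run of least prime factors i of M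
theorem divideOut_spec (M i : ℕ) (h1 : 1 ≤ M) (hi : 2 ≤ i) (hmin : NoDiv M i) :
    ∃ (R : ℕ) (L : List Int), divideOut (M : Int) (i : Int) = ((R : Int), L) ∧
      1 ≤ R ∧ R ≤ M ∧ NoDiv R (i + 1) ∧ F M = L ++ F R := by
  by_cases hd : i ∣ M
  · have h2M : 2 ≤ M := le_trans hi (Nat.le_of_dvd (by omega) hd)
    have hmf : M.minFac = i := minFac_eq_of M i h2M hi hd hmin
    have hmod : PySem.Int.mod (M : Int) (i : Int) = 0 :=
      (PySem.Int.mod_eq_zero_iff_dvd _ _).mpr (Int.natCast_dvd_natCast.mpr hd)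
    have hfd : PySem.Int.floordiv (M : Int) (i : Int) = ((M / i : ℕ) : Int) :=
      PySem.Int.floordiv_natCast M i
    have hM1 : 1 ≤ M / i := (Nat.one_le_div_iff (by omega)).mpr (Nat.le_of_dvd (by omega) hd)
    have hmin' : NoDiv (M / i) i := NoDiv_of_dvd hmin (Nat.div_dvd_of_dvd hd)
    obtain ⟨R, L, hEq, hR1, hRle, hRmin, hF⟩ := divideOut_spec (M / i) i hM1 hi hmin'
    refine ⟨R, (i : Int) :: L, ?_, hR1, le_trans hRle (Nat.div_le_self _ _), hRmin, ?_⟩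
    · rw [divideOut, dif_pos ⟨by exact_mod_cast hi, by exact_mod_cast h1, hmod⟩, hfd, hEq]
    · rw [F_eq M h2M, hmf, hF]
      have : M / M.minFac = M / i := by rw [hmf]
      rw [hmf] at *
      simp
  · have hmod : ¬ PySem.Int.mod (M : Int) (i : Int) = 0 := by
      rw [PySem.Int.mod_eq_zero_iff_dvd]
      exact fun hc => hd (Int.natCast_dvd_natCast.mp hc)
    refine ⟨M, [], ?_, h1, le_refl M, ?_, by simp⟩
    · rw [divideOut, dif_neg (by tauto)]
    · intro e h2 hlt hdd
      rcases Nat.lt_or_ge e i with h | h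
      · exact hmin e h2 h hdd
      · have : e = i := by omega
        exact hd (this ▸ hdd)
termination_by M
decreasing_by
  exact Nat.div_lt_self (by omega) (by omega)

-- A's inner for-loop computes the factorisation of M, given no divisor below i remains
theorem innerA_spec (M i N : ℕ) (acc : List Int) (h1 : 1 ≤ M) (hi : 2 ≤ i) (hMN : M ≤ N)
    (hmin : NoDiv M i) :
    innerA (PySem.List.pyRange (i : Int) ((N : Int) + 1) 1) (M : Int) acc = acc ++ F M := by
  rcases Nat.lt_or_ge N i with hiN | hiN
  · rw [PySem.List.pyRange_one_eq_nil (by omega)]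
    have hM1 : M = 1 := by
      by_contra hc
      exact hmin M (by omega) (by omega) dvd_rfl
    subst hM1
    simp [innerA, F_one]
  · rw [PySem.List.pyRange_one_cons (by omega)]
    obtain ⟨R, L, hEq, hR1, hRle, hRmin, hF⟩ := divideOut_spec M i h1 hi hmin
    simp only [innerA, hEq]
    by_cases hR : R = 1
    · subst hR
      rw [if_pos (by norm_num), hF, F_one]
      simp
    · rw [if_neg (by exact_mod_cast (by omega : ¬ (R : Int) = 1))]
      have hrec := innerA_spec R (i + 1) N (acc ++ L) hR1 (by omega) (le_trans hRle hMN) hRmin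
      rw [show ((i : Int) + 1) = ((i + 1 : ℕ) : Int) by push_cast; ring] at *
      rw [hrec, hF]
      simp
termination_by N + 1 - i
decreasing_by
  omega

-- B's while loop computes the factorisation of M, given no divisor below d remains
theorem facLoop_spec (M d : ℕ) (acc : List Int) (h1 : 1 ≤ M) (hd : 2 ≤ d)
    (hmin : NoDiv M d) : facLoop (M : Int) (d : Int) acc = acc ++ F M := by
  by_cases hg : d * d ≤ M
  · have h2M : 2 ≤ M := by nlinarith
    have hdM : d ≤ M := le_trans (Nat.le_mul_of_pos_left d (by omega)) hg
    rw [facLoop, dif_pos ⟨by exact_mod_cast hd, by exact_mod_cast hg⟩]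
    by_cases hdd : d ∣ M
    · have hmod : PySem.Int.mod (M : Int) (d : Int) = 0 :=
        (PySem.Int.mod_eq_zero_iff_dvd _ _).mpr (Int.natCast_dvd_natCast.mpr hdd)
      rw [if_pos hmod, PySem.Int.floordiv_natCast]
      have hM1 : 1 ≤ M / d := (Nat.one_le_div_iff (by omega)).mpr hdM
      have hmin' : NoDiv (M / d) d := NoDiv_of_dvd hmin (Nat.div_dvd_of_dvd hdd)
      rw [facLoop_spec (M / d) d (acc ++ [(d : Int)]) hM1 hd hmin']
      rw [F_eq M h2M, minFac_eq_of M d h2M hd hdd hmin]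
      simp
    · have hmod : ¬ PySem.Int.mod (M : Int) (d : Int) = 0 := by
        rw [PySem.Int.mod_eq_zero_iff_dvd]
        exact fun hc => hdd (Int.natCast_dvd_natCast.mp hc)
      rw [if_neg hmod]
      have hmin' : NoDiv M (d + 1) := by
        intro e h2 hlt hdd'
        rcases Nat.lt_or_ge e d with h | h
        · exact hmin e h2 h hdd'
        · have : e = d := by omega
          exact hdd (this ▸ hdd')
      have hrec := facLoop_spec M (d + 1) acc h1 (by omega) hmin'
      rw [show ((d : Int) + 1) = ((d + 1 : ℕ) : Int) by push_cast; ring]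
      exact hrec
  · rw [facLoop, dif_neg (by intro hc; exact hg (by exact_mod_cast hc.2))]
    rcases Nat.lt_or_ge M 2 with h2M | h2M
    · have hM1 : M = 1 := by omega
      subst hM1
      rw [if_neg (by norm_num)]
      simp [F_one]
    · rw [if_pos (by exact_mod_cast (by omega : (1 : ℕ) < M))]
      rw [F_eq M h2M, prime_of_small M d h2M (by omega) hmin, Nat.div_self (by omega), F_one]
termination_by (M, M - d)
decreasing_by
  all_goals first
    | (apply Prod.Lex.left
       exact Nat.div_lt_self (by omega) (by omega))
    | (apply Prod.Lex.right
       have h2d : 2 * d ≤ d * d := Nat.mul_le_mul_right d hd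
       omega)

-- ===== VERDICT (by name: the statement is the Claim_ definition above) =====
theorem f_spec : Claim_equal_f := by
  unfold Claim_equal_f Spec_f
  intro n _
  unfold f f_alt
  apply PySem.List.foldl_congr_mem
  intro acc nn hmem
  have hb := (PySem.List.mem_pyRange_neg_one).mp hmem
  have hM : ((nn.toNat : ℕ) : Int) = nn := Int.toNat_of_nonneg (by omega)
  rw [← hM]
  have h1 : 1 ≤ nn.toNat := by omega
  have hA := innerA_spec nn.toNat 2 nn.toNat acc h1 (by omega) (le_refl _) (NoDiv_two _)
  have hB := facLoop_spec nn.toNat 2 acc h1 (by omega) (NoDiv_two _)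
  rw [show ((2 : ℕ) : Int) = (2 : Int) by norm_num] at hA hB
  rw [hA, hB]
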